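-- pv_equiv track=rewrite | github.com/pricalinat/aicode | src/multi_agent_system/base62.py | encode_base62
-- ===== SOURCE A (Python) =====
-- import string
--
-- ALPHABET = string.ascii_letters + string.digits
--
-- def encode_base62(num: int) -> str:
--     """Encode number to base62."""
--     if num == 0:
--         return ALPHABET[0]
--     arr = []
--     base = len(ALPHABET)
--     while num:
--         num, rem = divmod(num, base)
--         arr.append(ALPHABET[rem])
--     return "".join(reversed(arr))
-- ===== SOURCE B (Python) =====
-- import string
--
-- ALPHABET = string.ascii_letters + string.digits
--
-- def encode_base62(num: int) -> str:
--     """Encode number to base62."""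
--     base = len(ALPHABET)
--     if num < base:
--         return ALPHABET[num]
--     return encode_base62(num // base) + ALPHABET[num % base]
-- ===== Notes on version B (the rewrite author's own statement) =====
-- stated objective: simpler
-- what changed: Replaced the while-loop that appends least-significant digits to a list and then joins the reversed list with a direct recursion on num // 62 that builds the string most-significant-digit first, with no accumulator list and no reverse; the num < 62 base case subsumes the num == 0 special case.
import Mathlib
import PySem

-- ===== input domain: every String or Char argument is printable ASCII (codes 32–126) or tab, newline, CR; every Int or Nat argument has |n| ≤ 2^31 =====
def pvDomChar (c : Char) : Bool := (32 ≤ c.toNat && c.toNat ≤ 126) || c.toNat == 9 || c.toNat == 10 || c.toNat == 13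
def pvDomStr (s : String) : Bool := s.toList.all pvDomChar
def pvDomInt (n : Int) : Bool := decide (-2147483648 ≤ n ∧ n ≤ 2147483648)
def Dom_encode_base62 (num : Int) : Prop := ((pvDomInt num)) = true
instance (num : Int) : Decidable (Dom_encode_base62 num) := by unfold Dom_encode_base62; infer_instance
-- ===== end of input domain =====

-- B replaces A's append-then-reverse digit loop by a direct most-significant-first recursion on num // 62 (simpler decomposition, same cost).


-- ===== PORT A =====
-- ALPHABET = string.ascii_letters + string.digits
def pvALPHA : List Char :=
  "abcdefghijklmnopqrstuvwxyzABCDEFGHIJKLMNOPQRSTUVWXYZ0123456789".toList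

-- the `while num:` loop of A; `num, rem = divmod(num, base)`, `arr.append(ALPHABET[rem])`.
-- For num < 0 the Python loop never terminates (outside Pre_); the `num < 0` guard only
-- makes the recursion total.  divmod's remainder satisfies 0 ≤ rem < 62, so `ALPHABET[rem]`
-- is exact via pyGet?.
def pvEncLoopA (num : Int) (arr : List Char) : List Char :=
  if num = 0 then arr
  else if num < 0 then arr
  else pvEncLoopA (PySem.Int.floordiv num 62)
        (arr ++ [(PySem.List.pyGet? pvALPHA (PySem.Int.mod num 62)).getD ' '])
termination_by num.toNat
decreasing_by
  have h1 : PySem.Int.floordiv num 62 = num / 62 :=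
    PySem.Int.floordiv_eq_ediv_of_pos (by omega)
  omega

def encode_base62 (num : Int) : String :=
  if num = 0 then String.ofList [(PySem.List.pyGet? pvALPHA 0).getD ' ']
  else String.ofList ((pvEncLoopA num []).reverse)

-- ===== PORT B =====
-- B's recursion, on the character list ("".join-free: str ++ stays on List Char per the
-- PySem convention; String.ofList is applied once at the surface).
def pvEncAlt (num : Int) : List Char :=
  if num < 62 then [(PySem.List.pyGet? pvALPHA num).getD ' ']
  else pvEncAlt (PySem.Int.floordiv num 62) ++
        [(PySem.List.pyGet? pvALPHA (PySem.Int.mod num 62)).getD ' ']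
termination_by num.toNat
decreasing_by
  have h1 : PySem.Int.floordiv num 62 = num / 62 :=
    PySem.Int.floordiv_eq_ediv_of_pos (by omega)
  omega

def encode_base62_alt (num : Int) : String := String.ofList (pvEncAlt num)

-- ===== PRECONDITION & SPEC =====
-- A's while-loop never terminates for negative num (divmod floors toward -∞), so A
-- returns only on nonnegative input.
def Pre_encode_base62 (num : Int) : Prop := 0 ≤ num
instance (num : Int) : Decidable (Pre_encode_base62 num) := by
  unfold Pre_encode_base62; infer_instance

def pvWitness_encode_base62 : Int := (12345)

def Spec_encode_base62 (num : Int) (out : String) : Prop := out = encode_base62_alt num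
instance (num : Int) (out : String) : Decidable (Spec_encode_base62 num out) := by
  unfold Spec_encode_base62; infer_instance

-- ===== CLAIM (what is proved, stated in full; the proofs are below) =====
def Claim_equal_encode_base62 : Prop :=
  ∀ (num : Int), Dom_encode_base62 num → Pre_encode_base62 num →
    Spec_encode_base62 num (encode_base62 num)

-- ===== LEMMAS AND PROOFS =====

theorem pvEncLoopA_base (num : Int) (arr : List Char) (h : num ≤ 0) :
    pvEncLoopA num arr = arr := by
  rw [pvEncLoopA]
  by_cases h0 : num = 0
  · simp [h0]
  · simp [h0, show num < 0 by omega]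

-- the loop's accumulator only collects digits at the back
theorem pvEncLoopA_shift (n : Nat) :
    ∀ (num : Int) (arr : List Char), num.toNat ≤ n →
      pvEncLoopA num arr = arr ++ pvEncLoopA num [] := by
  induction n with
  | zero =>
      intro num arr h
      have hle : num ≤ 0 := by omega
      rw [pvEncLoopA_base _ _ hle, pvEncLoopA_base _ _ hle]; simp
  | succ n ih =>
      intro num arr h
      by_cases hle : num ≤ 0
      · rw [pvEncLoopA_base _ _ hle, pvEncLoopA_base _ _ hle]; simp
      · have h0 : ¬ num = 0 := by omega
        have hneg : ¬ num < 0 := by omega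
        have hfd : PySem.Int.floordiv num 62 = num / 62 :=
            PySem.Int.floordiv_eq_ediv_of_pos (by omega)
        rw [pvEncLoopA, if_neg h0, if_neg hneg]
        conv_rhs => rw [pvEncLoopA, if_neg h0, if_neg hneg]
        rw [ih _ _ (by omega), ih _ ([] ++ _) (by omega)]
        simp

theorem pvMain (n : Nat) :
    ∀ (num : Int), num.toNat ≤ n → 0 < num →
      (pvEncLoopA num []).reverse = pvEncAlt num := by
  induction n with
  | zero => intro num h hpos; omega
  | succ n ih =>
      intro num h hpos
      have hfd : PySem.Int.floordiv num 62 = num / 62 :=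
        PySem.Int.floordiv_eq_ediv_of_pos (by omega)
      have hmd : PySem.Int.mod num 62 = num % 62 :=
        PySem.Int.mod_eq_emod_of_pos (by omega)
      rw [pvEncLoopA, if_neg (by omega), if_neg (by omega),
          pvEncLoopA_shift (num / 62).toNat _ _ (by omega)]
      by_cases hlt : num < 62
      · have hq : num / 62 = 0 := by omega
        have hm : num % 62 = num := by omega
        rw [pvEncAlt, if_pos hlt, hfd, hmd, hq, hm, pvEncLoopA_base _ _ (by omega)]
        simp
      · have hq : 0 < num / 62 := by omega
        rw [pvEncAlt, if_neg hlt, hfd, hmd]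
        simp [← ih (num / 62) (by omega) hq]

-- ===== VERDICT (by name: the statement is the Claim_ definition above) =====
theorem encode_base62_spec : Claim_equal_encode_base62 := by
  intro num _ hpre
  unfold Spec_encode_base62 encode_base62 encode_base62_alt
  by_cases h0 : num = 0
  · subst h0; rw [pvEncAlt]; simp
  · rw [if_neg h0,
        pvMain num.toNat num le_rfl (by unfold Pre_encode_base62 at hpre; omega)]
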